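-- pv_equiv track=rewrite | github.com/WenqiWu-ZJE/IBI1_2025-26 | Practical 7/stop_codons.py | find_stop_codons
-- ===== SOURCE A (Python) =====
-- def find_stop_codons(sequence):
--     start_pos = sequence.find('ATG')
--     if start_pos == -1:
--         return []
--     found_stops = set()
--     stop_codons = {'TAA', 'TAG', 'TGA'}
--     for i in range(start_pos, len(sequence) - 2, 3):
--         codon = sequence[i:i+3]
--         if codon in stop_codons:
--             found_stops.add(codon)
--     return sorted(list(found_stops))
-- ===== SOURCE B (Python) =====
-- def find_stop_codons(sequence):
--     start = sequence.find('ATG')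
--     if start == -1:
--         return []
--     taa = tag = tga = False
--     rest = sequence[start:]
--     while len(rest) >= 3:
--         codon = rest[:3]
--         if codon == 'TAA':
--             taa = True
--         elif codon == 'TAG':
--             tag = True
--         elif codon == 'TGA':
--             tga = True
--         rest = rest[3:]
--     return [c for c, f in (('TAA', taa), ('TAG', tag), ('TGA', tga)) if f]
-- ===== Notes on version B (the rewrite author's own statement) =====
-- stated objective: simpler
-- what changed: B replaces A's set-accumulation over an index range followed by sorting with a single chunked walk over the suffix after ATG that tracks three boolean flags and emits the result list in fixed sorted order, so no set and no sort are needed.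
import Mathlib
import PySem

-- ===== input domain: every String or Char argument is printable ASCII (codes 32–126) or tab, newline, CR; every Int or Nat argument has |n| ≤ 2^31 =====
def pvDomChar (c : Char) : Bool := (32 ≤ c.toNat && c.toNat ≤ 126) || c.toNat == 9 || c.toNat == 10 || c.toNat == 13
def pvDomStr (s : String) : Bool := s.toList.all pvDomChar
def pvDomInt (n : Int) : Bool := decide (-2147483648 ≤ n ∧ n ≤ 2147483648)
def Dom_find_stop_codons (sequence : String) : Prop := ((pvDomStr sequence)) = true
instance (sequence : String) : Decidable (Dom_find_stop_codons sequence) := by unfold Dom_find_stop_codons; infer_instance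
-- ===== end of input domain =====

-- B replaces A's set-accumulate-then-sort index scan with one chunked walk tracking three
-- boolean flags, emitting the result in fixed sorted order (simpler; same O(n) cost).


-- ===== PORT A =====
def find_stop_codons (sequence : String) : List String :=
  let start_pos := PySem.Str.find sequence "ATG"
  if start_pos = -1 then []
  else
    let stop_codons : PySem.Set String := PySem.Set.ofList ["TAA", "TAG", "TGA"]
    let found_stops : PySem.Set String :=
      (PySem.List.pyRange start_pos (PySem.Str.len sequence - 2) 3).foldl
        (fun s i =>
          let codon := PySem.Str.slice sequence (some i) (some (i + 3))
          if stop_codons.contains codon then s.add codon else s)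
        PySem.Set.empty
    PySem.List.sorted found_stops (fun x => x)

-- ===== PORT B =====
-- the while loop of Source B: walk the suffix in chunks of 3 maintaining the three flags
def pvChunkFlags : List Char → Bool → Bool → Bool → Bool × Bool × Bool
  | c1 :: c2 :: c3 :: rest, taa, tag, tga =>
    if [c1, c2, c3] = ['T', 'A', 'A'] then pvChunkFlags rest true tag tga
    else if [c1, c2, c3] = ['T', 'A', 'G'] then pvChunkFlags rest taa true tga
    else if [c1, c2, c3] = ['T', 'G', 'A'] then pvChunkFlags rest taa tag true
    else pvChunkFlags rest taa tag tga
  | _, taa, tag, tga => (taa, tag, tga)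

def find_stop_codons_alt (sequence : String) : List String :=
  let start := PySem.Str.find sequence "ATG"
  if start = -1 then []
  else
    let rest := PySem.Str.slice sequence (some start) none
    let (taa, tag, tga) := pvChunkFlags rest.toList false false false
    (if taa then ["TAA"] else []) ++ (if tag then ["TAG"] else []) ++ (if tga then ["TGA"] else [])

-- ===== PRECONDITION & SPEC =====
def Spec_find_stop_codons (sequence : String) (out : List String) : Prop := out = find_stop_codons_alt sequence
instance (sequence : String) (out : List String) : Decidable (Spec_find_stop_codons sequence out) := by unfold Spec_find_stop_codons; infer_instance

-- ===== CLAIM (what is proved, stated in full; the proofs are below) =====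
def Claim_equal_find_stop_codons : Prop := ∀ (sequence : String), Dom_find_stop_codons sequence → Spec_find_stop_codons sequence (find_stop_codons sequence)

-- ===== LEMMAS AND PROOFS =====

-- does the 3-char pattern p occur as one of the in-frame chunks of m?
def pvHit : List Char → List Char → Bool
  | c1 :: c2 :: c3 :: rest, p => ([c1, c2, c3] = p : Bool) || pvHit rest p
  | _, _ => false

-- A's loop body, rephrased as structural recursion over the suffix's chunks
def pvSetChunk : List Char → PySem.Set String → PySem.Set String
  | c1 :: c2 :: c3 :: rest, s =>
    pvSetChunk rest
      (if (PySem.Set.ofList ["TAA", "TAG", "TGA"]).contains (String.ofList [c1, c2, c3]) then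
        s.add (String.ofList [c1, c2, c3])
      else s)
  | _, s => s

theorem pvRange3_nil (a b : Int) (h : b ≤ a) : PySem.List.pyRange a b 3 = [] := by
  rw [PySem.List.pyRange_of_pos a b (by norm_num)]
  simp [if_neg (by omega : ¬ a < b)]

theorem pvRange3_cons (a b : Int) (h : a < b) :
    PySem.List.pyRange a b 3 = a :: PySem.List.pyRange (a + 3) b 3 := by
  rw [PySem.List.pyRange_of_pos a b (by norm_num), PySem.List.pyRange_of_pos (a+3) b (by norm_num)]
  have hcount : (if a < b then ((b - a + 3 - 1) / 3).toNat else 0)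
      = (if a + 3 < b then ((b - (a + 3) + 3 - 1) / 3).toNat else 0) + 1 := by
    rw [if_pos h]
    by_cases h2 : a + 3 < b <;> simp [h2] <;> omega
  rw [hcount, List.range_succ_eq_map, List.map_cons, List.map_map]
  congr 1
  · simp
  · apply List.map_congr_left
    intro k _
    simp [Function.comp, Nat.succ_eq_add_one]
    ring

theorem pvSetChunk_short (m : List Char) (s : PySem.Set String) (h : m.length < 3) :
    pvSetChunk m s = s := by
  match m with
  | [] => rfl
  | [_] => rfl
  | [_, _] => rfl
  | _ :: _ :: _ :: _ => simp at h; omega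

theorem pvHit_short (m : List Char) (p : List Char) (h : m.length < 3) : pvHit m p = false := by
  match m with
  | [] => rfl
  | [_] => rfl
  | [_, _] => rfl
  | _ :: _ :: _ :: _ => simp at h; omega

theorem pvFoldA_chunk (L : List Char) (j : Nat) (s : PySem.Set String) :
    (PySem.List.pyRange (j : Int) ((L.length : Int) - 2) 3).foldl
      (fun s i =>
        let codon := String.ofList (PySem.List.slice L (some i) (some (i + 3)))
        if (PySem.Set.ofList ["TAA", "TAG", "TGA"]).contains codon then s.add codon else s) s
    = pvSetChunk (L.drop j) s := by
  induction hd : L.length - j using Nat.strong_induction_on generalizing j s with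
  | _ d ih =>
    by_cases hj : (j : Int) < (L.length : Int) - 2
    · have h3 : j + 3 ≤ L.length := by omega
      rw [pvRange3_cons _ _ hj]
      have hdrop : L.drop j = ((L.drop j).take 3) ++ L.drop (j + 3) := by
        rw [← List.drop_drop]
        simp
      obtain ⟨c1, c2, c3, htake⟩ : ∃ c1 c2 c3, (L.drop j).take 3 = [c1, c2, c3] := by
        have hlen : ((L.drop j).take 3).length = 3 := by
          simp; omega
        match htk : (L.drop j).take 3 with
        | [a, b, c] => exact ⟨a, b, c, rfl⟩
        | [] | [_] | [_,_] => rw [htk] at hlen; simp at hlen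
        | _::_::_::_::_ => rw [htk] at hlen; simp at hlen
      have hslice : PySem.List.slice L (some (j : Int)) (some ((j : Int) + 3)) = [c1, c2, c3] := by
        have h33 : ((j : Int) + 3) = ((j : Int) + ((3 : Nat) : Int)) := by norm_num
        rw [h33, PySem.List.slice_natCast_add, htake]
      rw [List.foldl_cons]
      simp only [hslice]
      have hcast : (j : Int) + 3 = (((j + 3 : Nat)) : Int) := by push_cast; ring
      rw [hcast, ih (L.length - (j + 3)) (by omega) (j + 3) _ rfl]
      have hform : L.drop j = c1 :: c2 :: c3 :: L.drop (j + 3) := by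
        rw [hdrop, htake]; rfl
      rw [hform]
      rfl
    · rw [pvRange3_nil _ _ (by omega)]
      rw [pvSetChunk_short _ _ (by simp; omega)]
      rfl

theorem pvListShort (m : List Char)
    (hm : ∀ (c1 c2 c3 : Char) (rest : List Char), m = c1 :: c2 :: c3 :: rest → False) :
    m.length < 3 := by
  match m, hm with
  | [], _ => simp
  | [_], _ => simp
  | [_,_], _ => simp
  | c1::c2::c3::r, hm => exact absurd rfl (hm c1 c2 c3 r)

theorem pvChunkFlags_short (m : List Char) (taa tag tga : Bool) (h : m.length < 3) :
    pvChunkFlags m taa tag tga = (taa, tag, tga) := by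
  match m with
  | [] => rfl
  | [_] => rfl
  | [_, _] => rfl
  | _ :: _ :: _ :: _ => simp at h; omega

theorem pvTAA : String.ofList ['T','A','A'] = "TAA" := rfl
theorem pvTAG : String.ofList ['T','A','G'] = "TAG" := rfl
theorem pvTGA : String.ofList ['T','G','A'] = "TGA" := rfl

theorem pvContains_eq (c : String) :
    ((PySem.Set.ofList ["TAA", "TAG", "TGA"]).contains c = true) = (c = "TAA" ∨ c = "TAG" ∨ c = "TGA") := by
  rw [PySem.Set.contains_iff, PySem.Set.mem_ofList]
  simp

theorem pvNodup_pvSetChunk (m : List Char) (s : PySem.Set String) :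
    s.Nodup → (pvSetChunk m s).Nodup := by
  induction m, s using pvSetChunk.induct with
  | case1 c1 c2 c3 rest s ih =>
    intro h
    show (pvSetChunk rest _).Nodup
    apply ih
    split
    · exact PySem.Set.nodup_add _ _ h
    · exact h
  | case2 m s hm =>
    intro h
    rw [pvSetChunk_short _ _ (pvListShort m hm)]
    exact h

theorem pvMem_pvSetChunk (m : List Char) (s : PySem.Set String) (x : String) :
    x ∈ pvSetChunk m s ↔ x ∈ s ∨
      ((x = "TAA" ∧ pvHit m ['T','A','A'] = true) ∨ (x = "TAG" ∧ pvHit m ['T','A','G'] = true)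
        ∨ (x = "TGA" ∧ pvHit m ['T','G','A'] = true)) := by
  induction m, s using pvSetChunk.induct with
  | case1 c1 c2 c3 rest s ih =>
    show x ∈ pvSetChunk rest _ ↔ _
    rw [ih]
    simp only [pvHit, pvContains_eq]
    by_cases h1 : [c1, c2, c3] = ['T', 'A', 'A']
    · obtain ⟨rfl, rfl, rfl⟩ : c1 = 'T' ∧ c2 = 'A' ∧ c3 = 'A' := by simpa using h1
      simp [pvTAA, PySem.Set.mem_add]
      tauto
    · by_cases h2 : [c1, c2, c3] = ['T', 'A', 'G']
      · obtain ⟨rfl, rfl, rfl⟩ : c1 = 'T' ∧ c2 = 'A' ∧ c3 = 'G' := by simpa using h2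
        simp [pvTAG, PySem.Set.mem_add]
        tauto
      · by_cases h3 : [c1, c2, c3] = ['T', 'G', 'A']
        · obtain ⟨rfl, rfl, rfl⟩ : c1 = 'T' ∧ c2 = 'G' ∧ c3 = 'A' := by simpa using h3
          simp [pvTGA, PySem.Set.mem_add]
          tauto
        · have hcond : ¬ (String.ofList [c1, c2, c3] = "TAA" ∨ String.ofList [c1, c2, c3] = "TAG"
              ∨ String.ofList [c1, c2, c3] = "TGA") := by
            rintro (h | h | h)
            · exact h1 (by simpa using congrArg String.toList h)
            · exact h2 (by simpa using congrArg String.toList h)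
            · exact h3 (by simpa using congrArg String.toList h)
          rw [if_neg hcond]
          simp [h1, h2, h3]
  | case2 m s hm =>
    have hlen : m.length < 3 := pvListShort m hm
    rw [pvSetChunk_short _ _ hlen, pvHit_short _ _ hlen, pvHit_short _ _ hlen, pvHit_short _ _ hlen]
    simp

theorem pvFlags_eq (m : List Char) (taa tag tga : Bool) :
    pvChunkFlags m taa tag tga =
      (taa || pvHit m ['T','A','A'], tag || pvHit m ['T','A','G'], tga || pvHit m ['T','G','A']) := by
  induction m, taa, tag, tga using pvChunkFlags.induct with
  | case1 c1 c2 c3 rest taa tag tga h ih =>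
    simp [pvChunkFlags, pvHit, h, ih]
  | case2 c1 c2 c3 rest taa tag tga h1 h2 ih =>
    simp [pvChunkFlags, pvHit, h2, ih]
  | case3 c1 c2 c3 rest taa tag tga h1 h2 h3 ih =>
    simp [pvChunkFlags, pvHit, h3, ih]
  | case4 c1 c2 c3 rest taa tag tga h1 h2 h3 ih =>
    simp [pvChunkFlags, pvHit, h1, h2, h3, ih]
  | case5 m taa tag tga hm =>
    have hlen : m.length < 3 := pvListShort m hm
    rw [pvChunkFlags_short _ _ _ _ hlen,
        pvHit_short _ _ hlen, pvHit_short _ _ hlen, pvHit_short _ _ hlen]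
    simp

theorem pvMain (m : List Char) :
    PySem.List.sorted (pvSetChunk m PySem.Set.empty) (fun x => x) =
      (if pvHit m ['T','A','A'] then ["TAA"] else []) ++
      (if pvHit m ['T','A','G'] then ["TAG"] else []) ++
      (if pvHit m ['T','G','A'] then ["TGA"] else []) := by
  apply PySem.List.sorted_eq_of_perm_of_pairwise_lt
  · rw [List.perm_ext_iff_of_nodup ?_ (pvNodup_pvSetChunk m _ (by simp [PySem.Set.empty]))]
    · intro a
      rw [pvMem_pvSetChunk]
      cases hb1 : pvHit m ['T','A','A'] <;> cases hb2 : pvHit m ['T','A','G'] <;>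
        cases hb3 : pvHit m ['T','G','A'] <;>
        simp [PySem.Set.empty]
    · cases hb1 : pvHit m ['T','A','A'] <;> cases hb2 : pvHit m ['T','A','G'] <;>
        cases hb3 : pvHit m ['T','G','A'] <;> simp
  · cases hb1 : pvHit m ['T','A','A'] <;> cases hb2 : pvHit m ['T','A','G'] <;>
      cases hb3 : pvHit m ['T','G','A'] <;>
      simp [List.pairwise_cons] <;> decide

-- ===== VERDICT (by name: the statement is the Claim_ definition above) =====
theorem find_stop_codons_spec : Claim_equal_find_stop_codons := by
  intro sequence _
  unfold Spec_find_stop_codons find_stop_codons find_stop_codons_alt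
  by_cases hneg : PySem.Str.find sequence "ATG" = -1
  · simp only [hneg]
    norm_num
  · have hge : -1 ≤ PySem.Str.find sequence "ATG" := by
      rw [PySem.Str.find_eq]
      exact PySem.Chars.neg_one_le_find _ _
    obtain ⟨j, hj⟩ : ∃ j : Nat, PySem.Str.find sequence "ATG" = (j : Int) :=
      ⟨_, (Int.toNat_of_nonneg (by omega)).symm⟩
    simp only [hj, PySem.Str.len_eq, PySem.Str.slice, PySem.Chars.slice, String.toList_ofList,
      PySem.List.slice_from_natCast]
    rw [if_neg (by omega), if_neg (by omega)]
    rw [pvFoldA_chunk sequence.toList j PySem.Set.empty, pvFlags_eq]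
    simp only [Bool.false_or]
    exact pvMain (sequence.toList.drop j)
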